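-- pv_equiv track=rewrite | github.com/BalzhanMukasheva/lab444 | lab4_bonus_MukashevaBalzhan (7).py | count_elements_in_tuple
-- ===== SOURCE A (Python) =====
-- def count_elements_in_tuple(input_tuple):
--     # Создаем пустой словарь для подсчета вхождений элементов
--     element_count = {}
--
--     try:
--         # Итерируемся по элементам в кортеже
--         for item in input_tuple:
--             # Пробуем преобразовать элемент в строку (если это не строка)
--             try:
--                 item_str = str(item)
--             except Exception as e:
--                 item_str = str(item)
--
--             # Если элемент уже есть в словаре, увеличиваем счетчик на 1, иначе добавляем его в словарь
--             if item_str in element_count: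
--                 element_count[item_str] += 1
--             else:
--                 element_count[item_str] = 1
--
--         # Создаем новый кортеж, содержащий пары элементов и их количество вхождений
--         result_tuple = tuple((key, value) for key, value in element_count.items())
--
--         return result_tuple
--     except Exception as e:
--         return f"Ошибка: {str(e)}"
-- ===== SOURCE B (Python) =====
-- def count_elements_in_tuple(input_tuple):
--     try:
--         strs = [str(item) for item in input_tuple]
--         seen = set()
--         result = []
--         for s in strs:
--             if s not in seen:
--                 seen.add(s)
--                 result.append((s, strs.count(s)))
--         return tuple(result)
--     except Exception as e:
--         return f"Ошибка: {str(e)}"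
-- ===== Notes on version B (the rewrite author's own statement) =====
-- stated objective: alternative
-- what changed: Replaces A's incrementally updated count dictionary by a first-pass stringified list plus a seen-set, where each distinct element's count comes from a strs.count scan instead of dict increments, preserving first-appearance order.
import Mathlib
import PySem

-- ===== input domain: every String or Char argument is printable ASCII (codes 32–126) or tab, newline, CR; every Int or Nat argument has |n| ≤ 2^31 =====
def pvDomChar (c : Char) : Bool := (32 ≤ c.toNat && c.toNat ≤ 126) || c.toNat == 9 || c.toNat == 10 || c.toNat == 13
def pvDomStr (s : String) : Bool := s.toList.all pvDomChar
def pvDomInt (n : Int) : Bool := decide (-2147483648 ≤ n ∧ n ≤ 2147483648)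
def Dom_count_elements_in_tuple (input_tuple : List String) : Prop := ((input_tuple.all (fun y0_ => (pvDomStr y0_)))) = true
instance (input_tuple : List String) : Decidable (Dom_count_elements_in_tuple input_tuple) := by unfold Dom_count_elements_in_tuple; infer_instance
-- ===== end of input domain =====

-- B replaces A's incrementally updated count dictionary by a seen-set with one strs.count scan per distinct key
-- (objective: alternative decomposition, same first-appearance output order). Inputs are strings, so Python's
-- str(item) is the identity and neither try/except in A or B can fire.

-- ===== PORT A =====
def count_elements_in_tuple (input_tuple : List String) : List (String × Int) :=
  -- for item in input_tuple: item_str = str(item)  (identity on strings; the inner try cannot fail);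
  -- if item_str in element_count: element_count[item_str] += 1 else: element_count[item_str] = 1
  let element_count : PySem.Dict String Int :=
    input_tuple.foldl (fun d item =>
      let item_str := item
      if d.contains item_str then d.modify item_str 0 (· + 1) else d.insert item_str 1)
      PySem.Dict.empty
  -- tuple((key, value) for key, value in element_count.items())
  element_count.items

-- ===== PORT B =====
def count_elements_in_tuple_alt (input_tuple : List String) : List (String × Int) :=
  let strs := input_tuple.map (fun item => item)   -- [str(item) for item in input_tuple]; str is identity on strings
  let r := strs.foldl (fun (p : PySem.Set String × List (String × Int)) s =>
      if PySem.Set.contains p.1 s then p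
      else (PySem.Set.add p.1 s, p.2 ++ [(s, (PySem.List.count strs s : Int))]))
    (PySem.Set.empty, [])
  r.2

-- ===== PRECONDITION & SPEC =====
def Spec_count_elements_in_tuple (input_tuple : List String) (out : List (String × Int)) : Prop := out = count_elements_in_tuple_alt input_tuple
instance (input_tuple : List String) (out : List (String × Int)) : Decidable (Spec_count_elements_in_tuple input_tuple out) := by unfold Spec_count_elements_in_tuple; infer_instance

-- ===== CLAIM (what is proved, stated in full; the proofs are below) =====
def Claim_equal_count_elements_in_tuple : Prop := ∀ (input_tuple : List String), Dom_count_elements_in_tuple input_tuple → Spec_count_elements_in_tuple input_tuple (count_elements_in_tuple input_tuple)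

-- ===== LEMMAS AND PROOFS =====

-- A's branching step is exactly the Counter step.
theorem aStep_eq_counter_step (d : PySem.Dict String Int) (s : String) :
    (if d.contains s then d.modify s 0 (· + 1) else d.insert s 1) = d.modify s 0 (· + 1) := by
  by_cases h : d.contains s
  · simp [h]
  · have hc : d.contains s = false := by simpa using h
    simp [h, PySem.Dict.modify, PySem.Dict.getD_of_not_contains d 0 hc]

-- A's result: the distinct elements in first-appearance order, each with its total count.
theorem a_eq_map_counts (xs : List String) :
    count_elements_in_tuple xs
      = (PySem.Set.ofList xs).map (fun k => (k, (List.count k xs : Int))) := by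
  unfold count_elements_in_tuple
  have hstep : (fun (d : PySem.Dict String Int) item =>
      if d.contains item then d.modify item 0 (· + 1) else d.insert item 1)
      = fun d item => d.modify item 0 (· + 1) := by
    funext d item; exact aStep_eq_counter_step d item
  rw [hstep, ← PySem.Dict.counter_eq_foldl, PySem.Dict.items_counter]

-- Elements already in `seen` are filtered out whether or not y was discarded first (y ∈ seen).
theorem filt_skip (seen S : List String) (y : String) (hy : y ∈ seen) :
    (PySem.Set.discard S y).filter (fun k => !(PySem.Set.contains seen k))
      = S.filter (fun k => !(PySem.Set.contains seen k)) := by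
  simp only [PySem.Set.discard, List.filter_filter]
  apply List.filter_congr
  intro x hx
  by_cases hxy : x = y
  · subst hxy; simp [hy]
  · simp [hxy]

-- Filtering by `seen ∪ {y}` is filtering by `seen` after discarding y (y ∉ seen).
theorem filt_add (seen S : List String) (y : String) (hy : y ∉ seen) :
    S.filter (fun k => !(PySem.Set.contains (PySem.Set.add seen y) k))
      = (PySem.Set.discard S y).filter (fun k => !(PySem.Set.contains seen k)) := by
  rw [PySem.Set.add_of_not_mem hy]
  simp only [PySem.Set.discard, List.filter_filter]
  apply List.filter_congr
  intro x hx
  by_cases hxy : x = y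
  · subst hxy; simp
  · simp [hxy]

-- B's loop invariant: the accumulated list grows by one f-pair per not-yet-seen distinct element.
theorem bFold_snd (f : String → String × Int) :
    ∀ (ys : List String) (seen : PySem.Set String) (r : List (String × Int)),
    (ys.foldl (fun (p : PySem.Set String × List (String × Int)) s =>
        if PySem.Set.contains p.1 s then p
        else (PySem.Set.add p.1 s, p.2 ++ [f s])) (seen, r)).2
      = r ++ ((PySem.Set.ofList ys).filter (fun k => !(PySem.Set.contains seen k))).map f := by
  intro ys
  induction ys with
  | nil => intro seen r; simp [PySem.Set.ofList]
  | cons y ys ih =>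
    intro seen r
    rw [List.foldl_cons, PySem.Set.ofList_cons, List.filter_cons]
    by_cases h : PySem.Set.contains seen y
    · have hmem : y ∈ seen := by simpa using h
      rw [if_pos h, ih, filt_skip seen _ y hmem]
      simp [hmem]
    · have hmem : y ∉ seen := by simpa using h
      rw [if_neg h, ih, filt_add seen _ y hmem]
      simp [hmem]

-- ===== VERDICT (by name: the statement is the Claim_ definition above) =====
theorem count_elements_in_tuple_spec : Claim_equal_count_elements_in_tuple := by
  intro xs _
  unfold Spec_count_elements_in_tuple count_elements_in_tuple_alt
  simp only [List.map_id']
  rw [bFold_snd, a_eq_map_counts]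
  simp [PySem.Set.empty, PySem.List.count]
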